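-- pv_equiv track=rewrite | github.com/KazukiNoSuzaku/Leetcode | Python/1649_Create_Sorted_Array_through_Instructions.py | createSortedArray
-- ===== SOURCE A (Python) =====
-- def createSortedArray(instructions):
--     """
--     :type instructions: List[int]
--     :rtype: int
--     """
--     MOD = 10 ** 9 + 7
--     m = max(instructions) + 2
--     tree = [0] * m
--
--     def update(i):
--         while i < m:
--             tree[i] += 1
--             i += i & (-i)
--
--     def query(i):
--         s = 0
--         while i > 0:
--             s += tree[i]
--             i -= i & (-i)
--         return s
--
--     cost = 0
--     for i, num in enumerate(instructions):
--         left = query(num - 1)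
--         right = i - query(num)
--         cost = (cost + min(left, right)) % MOD
--         update(num)
--     return cost
-- ===== SOURCE B (Python) =====
-- def createSortedArray(instructions):
--     """
--     :type instructions: List[int]
--     :rtype: int
--     """
--     MOD = 10 ** 9 + 7
--     cost = 0
--     for i, num in enumerate(instructions):
--         lo = 0
--         hi = 0
--         for x in instructions[:i]:
--             if x < num:
--                 lo += 1
--             elif x > num:
--                 hi += 1
--         cost = (cost + min(lo, hi)) % MOD
--     return cost
-- ===== Notes on version B (the rewrite author's own statement) =====
-- stated objective: simpler
-- what changed: Replaces A's Fenwick (binary indexed) tree with its bit-twiddling update/query while-loops by a plain rescan of the already-processed prefix that counts strictly-smaller and strictly-larger elements directly.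
-- outside the precondition, e.g. on createSortedArray([]): A raises ValueError, B returns 0
import Mathlib
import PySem

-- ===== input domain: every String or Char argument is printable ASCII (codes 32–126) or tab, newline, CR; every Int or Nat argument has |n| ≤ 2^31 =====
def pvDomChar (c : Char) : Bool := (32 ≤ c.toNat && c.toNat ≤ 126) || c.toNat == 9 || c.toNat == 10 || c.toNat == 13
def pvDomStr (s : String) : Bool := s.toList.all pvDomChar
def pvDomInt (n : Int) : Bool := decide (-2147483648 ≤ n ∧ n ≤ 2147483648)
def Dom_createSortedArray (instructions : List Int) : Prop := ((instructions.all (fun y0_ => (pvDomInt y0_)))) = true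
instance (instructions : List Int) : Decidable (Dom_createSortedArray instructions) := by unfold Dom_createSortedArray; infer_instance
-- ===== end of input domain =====

-- B replaces A's Fenwick (binary indexed) tree by a direct scan that counts strictly-smaller
-- and strictly-larger earlier elements; objective: simpler (no speed claim).

-- ===== PORT A =====

-- i & (-i), the Fenwick lowbit
def pvLowbit (i : Int) : Int := PySem.Int.band i (-i)

-- 'def update(i): while i < m: tree[i] += 1; i += i & (-i)'.
-- The extra '0 < pvLowbit i' guard and the '.toNat' index are exact wherever Python's update
-- returns: they only differ for i ≤ 0, where Python's update never terminates (or raises on a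
-- far-negative index), so A as a whole returns nothing there — excluded by Pre_.
def pvUpdate (mI : Int) (tree : List Int) (i : Int) : List Int :=
  if _h : i < mI ∧ 0 < pvLowbit i then
    pvUpdate mI (tree.set i.toNat (tree.getD i.toNat 0 + 1)) (i + pvLowbit i)
  else tree
termination_by (mI - i).toNat
decreasing_by omega

-- 'def query(i): s = 0; while i > 0: s += tree[i]; i -= i & (-i); return s'.
-- Same remark: for 0 < i the lowbit is positive, so the added guard never fires there;
-- tree.getD reads the same cell Python reads (index in range under Pre_).
def pvQuery (tree : List Int) (i : Int) : Int :=
  if _h : 0 < i ∧ 0 < pvLowbit i then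
    tree.getD i.toNat 0 + pvQuery tree (i - pvLowbit i)
  else 0
termination_by i.toNat
decreasing_by omega

-- 'for i, num in enumerate(instructions): ...'
def pvLoopA (mI MOD : Int) (pairs : List (Int × Int)) (tree : List Int) (cost : Int) : Int :=
  match pairs with
  | [] => cost
  | (i, num) :: rest =>
    let left := pvQuery tree (num - 1)
    let right := i - pvQuery tree num
    let cost' := PySem.Int.mod (cost + min left right) MOD
    pvLoopA mI MOD rest (pvUpdate mI tree num) cost'

def createSortedArray (instructions : List Int) : Int :=
  match PySem.List.max? instructions (fun x => x) with
  | none => 0   -- max(instructions) raises ValueError on []; excluded by Pre_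
  | some mx =>
    let MOD : Int := 10 ^ 9 + 7
    let mI : Int := mx + 2
    let tree : List Int := List.replicate mI.toNat 0
    pvLoopA mI MOD (PySem.List.enumerate instructions) tree 0

-- ===== PORT B =====

-- the inner 'for x in instructions[:i]' counting loop of Source B
def pvCount (num : Int) (xs : List Int) : Int × Int :=
  xs.foldl
    (fun p x => if x < num then (p.1 + 1, p.2) else if num < x then (p.1, p.2 + 1) else p)
    (0, 0)

-- one iteration of Source B's outer loop: p = (i, num)
def pvStepB (instructions : List Int) (MOD : Int) (cost : Int) (p : Int × Int) : Int :=
  let c := pvCount p.2 (PySem.List.slice instructions none (some p.1))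
  PySem.Int.mod (cost + min c.1 c.2) MOD

def createSortedArray_alt (instructions : List Int) : Int :=
  (PySem.List.enumerate instructions).foldl (pvStepB instructions (10 ^ 9 + 7)) 0

-- ===== PRECONDITION & SPEC =====
-- Pre_ excludes exactly the inputs on which A returns nothing: max([]) raises ValueError on the
-- empty list, and any element ≤ 0 sends A's update loop to index 0, where 'i += i & (-i)' stops
-- making progress and the while loop runs forever (or a far-negative index raises IndexError first).
def Pre_createSortedArray (instructions : List Int) : Prop :=
  instructions ≠ [] ∧ ∀ x ∈ instructions, 1 ≤ x
instance (instructions : List Int) : Decidable (Pre_createSortedArray instructions) := by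
  unfold Pre_createSortedArray; infer_instance

def pvWitness_createSortedArray : List Int := [1, 5, 6, 2]

def Spec_createSortedArray (instructions : List Int) (out : Int) : Prop := out = createSortedArray_alt instructions
instance (instructions : List Int) (out : Int) : Decidable (Spec_createSortedArray instructions out) := by unfold Spec_createSortedArray; infer_instance

-- ===== CLAIM (what is proved, stated in full; the proofs are below) =====
def Claim_equal_createSortedArray : Prop := ∀ (instructions : List Int), Dom_createSortedArray instructions → Pre_createSortedArray instructions → Spec_createSortedArray instructions (createSortedArray instructions)

-- ===== LEMMAS AND PROOFS =====

-- lowbit over Nat: n - (n &&& (n-1)) (= 2^(trailing zeros of n) for n > 0)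
def lbN (n : Nat) : Nat := n - (n &&& (n - 1))

theorem and_odd (m : Nat) : (2 * m + 1) &&& (2 * m) = 2 * m := by
  apply Nat.eq_of_testBit_eq; intro i
  cases i with
  | zero =>
    rw [Nat.testBit_land]
    simp only [Nat.testBit_zero]
    rw [show (2 * m + 1) % 2 = 1 by omega, show (2 * m) % 2 = 0 by omega]
    simp
  | succ i =>
    rw [Nat.testBit_land]
    simp only [Nat.testBit_add_one]
    rw [show (2 * m + 1) / 2 = m by omega, show (2 * m) / 2 = m by omega, Bool.and_self]

theorem and_even (m : Nat) (h : 0 < m) : (2 * m) &&& (2 * m - 1) = 2 * (m &&& (m - 1)) := by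
  apply Nat.eq_of_testBit_eq; intro i
  cases i with
  | zero =>
    rw [Nat.testBit_land]
    simp only [Nat.testBit_zero]
    rw [show (2 * m) % 2 = 0 by omega, show (2 * (m &&& (m - 1))) % 2 = 0 by omega]
    simp
  | succ i =>
    rw [Nat.testBit_land]
    simp only [Nat.testBit_add_one]
    rw [show (2 * m) / 2 = m by omega, show (2 * m - 1) / 2 = m - 1 by omega,
      show (2 * (m &&& (m - 1))) / 2 = m &&& (m - 1) by omega, Nat.testBit_land]

theorem lbN_odd (m : Nat) : lbN (2 * m + 1) = 1 := by
  unfold lbN; rw [show 2 * m + 1 - 1 = 2 * m by omega, and_odd]; omega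

theorem lbN_even (m : Nat) (h : 0 < m) : lbN (2 * m) = 2 * lbN m := by
  unfold lbN; rw [and_even m h]
  have h1 : m &&& (m - 1) ≤ m := Nat.and_le_left
  omega

theorem lbN_le (n : Nat) : lbN n ≤ n := by unfold lbN; omega

theorem lbN_pos (n : Nat) (h : 0 < n) : 0 < lbN n := by
  rcases Nat.even_or_odd n with ⟨m, hm⟩ | ⟨m, hm⟩
  · have hn : n = 2 * m := by omega
    have ih := lbN_pos m (by omega)
    rw [hn, lbN_even m (by omega)]; omega
  · rw [show n = 2 * m + 1 by omega, lbN_odd]; omega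
termination_by n
decreasing_by omega

theorem lbN_add (n : Nat) (h : 0 < n) : 2 * lbN n ≤ lbN (n + lbN n) := by
  rcases Nat.even_or_odd n with ⟨m, hm⟩ | ⟨m, hm⟩
  · have hn : n = 2 * m := by omega
    have ih := lbN_add m (by omega)
    rw [hn, lbN_even m (by omega), show 2 * m + 2 * lbN m = 2 * (m + lbN m) by ring,
      lbN_even (m + lbN m) (by omega)]
    omega
  · rw [show n = 2 * m + 1 by omega, lbN_odd, show 2 * m + 1 + 1 = 2 * (m + 1) by ring,
      lbN_even (m + 1) (by omega)]
    have := lbN_pos (m + 1) (by omega)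
    omega
termination_by n
decreasing_by omega

theorem lbN_between (j c : Nat) (h1 : c < j) (h2 : j < c + lbN c) : lbN j ≤ j - c := by
  rcases Nat.even_or_odd c with ⟨a, hc⟩ | ⟨a, hc⟩
  · have hca : c = 2 * a := by omega
    by_cases ha : 0 < a
    · rcases Nat.even_or_odd j with ⟨b, hj⟩ | ⟨b, hj⟩
      · have hjb : j = 2 * b := by omega
        have hb1 : a < b := by omega
        have hb2 : b < a + lbN a := by
          rw [hca, lbN_even a ha] at h2; omega
        have ih := lbN_between b a hb1 hb2
        rw [hjb, lbN_even b (by omega)]; omega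
      · rw [show j = 2 * b + 1 by omega, lbN_odd]; omega
    · have : c = 0 := by omega
      subst this
      rw [show lbN 0 = 0 from rfl] at h2
      omega
  · rw [show c = 2 * a + 1 by omega, lbN_odd] at h2; omega
termination_by j
decreasing_by omega

theorem pvLowbit_coe (n : Nat) (h : 0 < n) : pvLowbit (n : Int) = (lbN n : Int) := by
  unfold pvLowbit PySem.Int.band lbN
  rw [if_pos (by omega : (0:Int) ≤ (n:Int)), if_neg (by omega : ¬ (0:Int) ≤ -(n:Int))]
  have h1 : ((n : Int)).toNat = n := by omega
  have h2 : (-(-(n : Int)) - 1).toNat = n - 1 := by omega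
  rw [h1, h2]

theorem pvLowbit_pos_eq (i : Int) (h : 0 < i) : pvLowbit i = (lbN i.toNat : Int) := by
  have h1 := pvLowbit_coe i.toNat (by omega)
  rw [show ((i.toNat : Nat) : Int) = i by omega] at h1
  exact h1

-- ===== chains =====

def qchainN (k : Nat) : List Nat :=
  if _h : 0 < k ∧ 0 < lbN k then k :: qchainN (k - lbN k) else []
termination_by k
decreasing_by omega

def uchainN (a m : Nat) : List Nat :=
  if _h : a < m ∧ 0 < lbN a then a :: uchainN (a + lbN a) m else []
termination_by m - a
decreasing_by omega

theorem qchain_mem_le (k : Nat) : ∀ j ∈ qchainN k, 0 < j ∧ j ≤ k := by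
  rw [qchainN]
  split
  · rename_i h
    intro j hj
    rcases List.mem_cons.mp hj with rfl | hj'
    · omega
    · have := qchain_mem_le (k - lbN k) j hj'
      omega
  · simp
termination_by k
decreasing_by omega

theorem qcount (k a : Nat) (ha : 0 < a) :
    ((qchainN k).map (fun j => if a ≤ j ∧ j - lbN j < a then (1:Int) else 0)).sum
      = if a ≤ k then 1 else 0 := by
  rw [qchainN]
  split
  · rename_i h
    have hlb : lbN k ≤ k := lbN_le k
    simp only [List.map_cons, List.sum_cons]
    rw [qcount (k - lbN k) a ha]
    split_ifs <;> omega
  · rename_i h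
    have hk : k = 0 := by
      by_contra hk0
      exact h ⟨by omega, lbN_pos k (by omega)⟩
    subst hk
    simp
    omega
termination_by k
decreasing_by omega

theorem uchain_ge (a m : Nat) : ∀ j ∈ uchainN a m, a ≤ j := by
  rw [uchainN]
  split
  · rename_i h
    intro j hj
    rcases List.mem_cons.mp hj with rfl | hj'
    · omega
    · have := uchain_ge (a + lbN a) m j hj'
      omega
  · simp
termination_by m - a
decreasing_by omega

theorem uchain_inv (c m a : Nat) (ha : 0 < a) (h1 : a ≤ c) (h2 : c - lbN c < a) :
    ∀ j ∈ uchainN c m, a ≤ j ∧ j < m ∧ j - lbN j < a := by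
  rw [uchainN]
  split
  · rename_i h
    intro j hj
    rcases List.mem_cons.mp hj with rfl | hj'
    · exact ⟨h1, h.1, h2⟩
    · have hadd := lbN_add c (by omega)
      exact uchain_inv (c + lbN c) m a ha (by omega) (by omega) j hj'
  · simp
termination_by m - c
decreasing_by omega

theorem uchain_mem (a m j : Nat) (ha : 0 < a) (h1 : a ≤ j) (h2 : j < m) (h3 : j - lbN j < a) :
    j ∈ uchainN a m := by
  rw [uchainN, dif_pos ⟨by omega, lbN_pos a ha⟩]
  by_cases hja : j = a
  · exact hja ▸ List.mem_cons_self
  · have hlba : 0 < lbN a := lbN_pos a ha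
    have hstep : a + lbN a ≤ j := by
      by_contra hlt
      have := lbN_between j a (by omega) (by omega)
      omega
    exact List.mem_cons_of_mem _
      (uchain_mem (a + lbN a) m j (by omega) hstep h2 (by omega))
termination_by j - a
decreasing_by omega

theorem uchain_char (a m j : Nat) (ha : 0 < a) :
    j ∈ uchainN a m ↔ (a ≤ j ∧ j < m ∧ j - lbN j < a) := by
  constructor
  · intro h
    exact uchain_inv a m a ha le_rfl (by have := lbN_pos a ha; omega) j h
  · rintro ⟨x, y, z⟩
    exact uchain_mem a m j ha x y z

theorem countInter (k a m : Nat) (ha : 0 < a) (_ham : a < m) (hkm : k < m) :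
    ((qchainN k).map (fun j => if j ∈ uchainN a m then (1:Int) else 0)).sum
      = if a ≤ k then 1 else 0 := by
  rw [List.map_congr_left (g := fun j => if a ≤ j ∧ j - lbN j < a then (1:Int) else 0) ?_,
    qcount k a ha]
  intro j hj
  obtain ⟨hj0, hjk⟩ := qchain_mem_le k j hj
  have hchar := uchain_char a m j ha
  show (if j ∈ uchainN a m then (1:Int) else 0) = (if a ≤ j ∧ j - lbN j < a then (1:Int) else 0)
  by_cases hm : j ∈ uchainN a m
  · rw [if_pos hm, if_pos ⟨(hchar.mp hm).1, (hchar.mp hm).2.2⟩]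
  · rw [if_neg hm, if_neg (fun hc => hm (hchar.mpr ⟨hc.1, by omega, hc.2⟩))]

-- ===== the tree operations against the chains =====

theorem update_length (mI : Int) (t : List Int) (i : Int) :
    (pvUpdate mI t i).length = t.length := by
  rw [pvUpdate]
  split
  · rename_i h
    rw [update_length]
    simp
  · rfl
termination_by (mI - i).toNat
decreasing_by omega

theorem getD_set_lt (l : List Int) (i j : Nat) (v : Int) (hi : i < l.length) :
    (l.set i v).getD j 0 = if j = i then v else l.getD j 0 := by
  by_cases hji : j = i
  · subst hji
    rw [if_pos rfl]
    simp only [List.getD_eq_getElem?_getD, List.getElem?_set, if_pos hi]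
    rfl
  · rw [if_neg hji]
    simp only [List.getD_eq_getElem?_getD, List.getElem?_set,
      if_neg (fun h : i = j => hji h.symm)]

theorem update_getD (mI : Int) (t : List Int) (i : Int) (j : Nat) (hi : 0 < i)
    (hlen : t.length = mI.toNat) :
    (pvUpdate mI t i).getD j 0
      = t.getD j 0 + (if j ∈ uchainN i.toNat mI.toNat then (1:Int) else 0) := by
  rw [pvUpdate, uchainN]
  have hlb : pvLowbit i = (lbN i.toNat : Int) := pvLowbit_pos_eq i hi
  have hlbp : 0 < lbN i.toNat := lbN_pos i.toNat (by omega)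
  by_cases hc : i < mI
  · rw [dif_pos ⟨hc, by omega⟩, dif_pos (⟨by omega, hlbp⟩ : i.toNat < mI.toNat ∧ 0 < lbN i.toNat)]
    rw [update_getD mI _ (i + pvLowbit i) j (by omega) (by simp [hlen])]
    have harg : (i + pvLowbit i).toNat = i.toNat + lbN i.toNat := by omega
    rw [harg, getD_set_lt t i.toNat j _ (by omega)]
    by_cases hji : j = i.toNat
    · subst hji
      rw [if_pos rfl,
        if_neg (fun hmem => absurd (uchain_ge _ _ _ hmem) (by omega)),
        if_pos List.mem_cons_self]
      ring
    · rw [if_neg hji]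
      have : (j ∈ uchainN (i.toNat + lbN i.toNat) mI.toNat)
          ↔ (j ∈ i.toNat :: uchainN (i.toNat + lbN i.toNat) mI.toNat) := by
        simp [List.mem_cons, hji]
      simp only [this]
  · rw [dif_neg (fun h => hc h.1), dif_neg (by omega)]
    simp
termination_by (mI - i).toNat
decreasing_by omega

theorem query_eq (t : List Int) (i : Int) :
    pvQuery t i = ((qchainN i.toNat).map (fun j => t.getD j 0)).sum := by
  rw [pvQuery, qchainN]
  by_cases hi : 0 < i
  · have hlb : pvLowbit i = (lbN i.toNat : Int) := pvLowbit_pos_eq i hi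
    have hlbp : 0 < lbN i.toNat := lbN_pos i.toNat (by omega)
    rw [dif_pos ⟨hi, by omega⟩, dif_pos (⟨by omega, hlbp⟩ : 0 < i.toNat ∧ 0 < lbN i.toNat)]
    simp only [List.map_cons, List.sum_cons]
    rw [query_eq t (i - pvLowbit i)]
    have hle := lbN_le i.toNat
    have : (i - pvLowbit i).toNat = i.toNat - lbN i.toNat := by omega
    rw [this]
  · rw [dif_neg (fun h => hi h.1), dif_neg (by omega)]
    simp
termination_by i.toNat
decreasing_by omega

theorem qsum_update (mI : Int) (t : List Int) (x : Int) (k : Nat) (hx : 0 < x) (hxm : x < mI)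
    (hlen : t.length = mI.toNat) (hk : k < mI.toNat) :
    ((qchainN k).map (fun j => (pvUpdate mI t x).getD j 0)).sum
      = ((qchainN k).map (fun j => t.getD j 0)).sum + (if x ≤ (k:Int) then 1 else 0) := by
  rw [List.map_congr_left
      (g := fun j => t.getD j 0 + (if j ∈ uchainN x.toNat mI.toNat then (1:Int) else 0))
      (fun j _ => update_getD mI t x j hx hlen),
    PySem.List.sum_map_add_int,
    countInter k x.toNat mI.toNat (by omega) (by omega) hk]
  have : (x.toNat ≤ k) ↔ (x ≤ (k:Int)) := by omega
  simp [this]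

-- ===== B's counting loop =====

theorem count_aux (num : Int) (l : List Int) (p : Int × Int) :
    l.foldl (fun p x => if x < num then (p.1 + 1, p.2) else if num < x then (p.1, p.2 + 1) else p) p
      = (p.1 + (l.countP (fun x => decide (x < num)) : Int),
         p.2 + (l.countP (fun x => decide (num < x)) : Int)) := by
  induction l generalizing p with
  | nil => simp
  | cons y l ih =>
    simp only [List.foldl_cons, List.countP_cons]
    rw [ih]
    by_cases h1 : y < num
    · have h2 : ¬ num < y := by omega
      simp [h1, h2, Prod.ext_iff]
      ring
    · by_cases h2 : num < y
      · simp [h1, h2, Prod.ext_iff]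
        ring
      · simp [h1, h2]

theorem count_eq (num : Int) (l : List Int) :
    pvCount num l = ((l.countP (fun x => decide (x < num)) : Int),
                     (l.countP (fun x => decide (num < x)) : Int)) := by
  unfold pvCount
  rw [count_aux]
  simp

-- ===== the main loop =====

theorem loop_eq (rest : List Int) : ∀ (pre tree : List Int) (cost mI MOD : Int) (xs : List Int),
    xs = pre ++ rest →
    (∀ x ∈ xs, 1 ≤ x ∧ x + 2 ≤ mI) →
    tree.length = mI.toNat →
    (∀ k : Nat, k < mI.toNat →
      ((qchainN k).map (fun j => tree.getD j 0)).sum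
        = (pre.countP (fun x => decide (x ≤ (k:Int))) : Int)) →
    pvLoopA mI MOD (PySem.List.enumerate rest (pre.length : Int)) tree cost
      = (PySem.List.enumerate rest (pre.length : Int)).foldl (pvStepB xs MOD) cost := by
  induction rest with
  | nil => intro pre tree cost mI MOD xs hxs hb hlen hq; simp [PySem.List.enumerate, pvLoopA]
  | cons num rest ih =>
    intro pre tree cost mI MOD xs hxs hb hlen hq
    rw [PySem.List.enumerate_cons]
    simp only [pvLoopA, List.foldl_cons]
    have hnum : 1 ≤ num ∧ num + 2 ≤ mI := hb num (by rw [hxs]; simp)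
    have hmI3 : 3 ≤ mI := by omega
    have hleft : pvQuery tree (num - 1) = (pre.countP (fun x => decide (x < num)) : Int) := by
      rw [query_eq, hq (num - 1).toNat (by omega)]
      congr 1
      apply List.countP_congr
      intro x _
      simp only [decide_eq_true_eq]
      omega
    have hright : pvQuery tree num = (pre.countP (fun x => decide (x ≤ num)) : Int) := by
      rw [query_eq, hq num.toNat (by omega)]
      congr 1
      apply List.countP_congr
      intro x _
      simp only [decide_eq_true_eq]
      omega
    have hlen_split := List.length_eq_countP_add_countP (fun x => decide (x ≤ num)) (l := pre)
    have hnot : pre.countP (fun a => decide ¬(decide (a ≤ num) = true))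
        = pre.countP (fun x => decide (num < x)) := by
      apply List.countP_congr
      intro x _
      simp only [decide_eq_true_eq]
      omega
    have hslice : PySem.List.slice xs none (some (pre.length : Int)) = pre := by
      rw [hxs, PySem.List.slice_to_natCast, List.take_left]
    have hlen2 : (pre.length : Int) - (pre.countP (fun x => decide (x ≤ num)) : Int)
        = (pre.countP (fun x => decide (num < x)) : Int) := by omega
    have hstep : PySem.Int.mod (cost + min (pvQuery tree (num - 1))
          ((pre.length : Int) - pvQuery tree num)) MOD
        = pvStepB xs MOD cost ((pre.length : Int), num) := by
      rw [show pvStepB xs MOD cost ((pre.length : Int), num)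
            = PySem.Int.mod (cost
                + min (pvCount num (PySem.List.slice xs none (some (pre.length : Int)))).1
                      (pvCount num (PySem.List.slice xs none (some (pre.length : Int)))).2) MOD
          from rfl]
      rw [hslice, count_eq, hleft, hright, hlen2]
    rw [hstep]
    have hstart : (pre.length : Int) + 1 = ((pre ++ [num]).length : Int) := by
      simp
    rw [hstart]
    apply ih (pre ++ [num]) (pvUpdate mI tree num) _ mI MOD xs (by rw [hxs]; simp) hb
      (by rw [update_length, hlen])
    intro k hk
    rw [qsum_update mI tree num k (by omega) (by omega) hlen hk, hq k hk,
      List.countP_append]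
    have : [num].countP (fun x => decide (x ≤ (k:Int))) = if num ≤ (k:Int) then 1 else 0 := by
      by_cases h : num ≤ (k:Int) <;> simp [h]
    rw [this]
    split_ifs <;> omega

-- ===== VERDICT (by name: the statement is the Claim_ definition above) =====
theorem createSortedArray_spec : Claim_equal_createSortedArray := by
  intro xs _ hpre
  unfold Spec_createSortedArray
  obtain ⟨hne, hpos⟩ := hpre
  unfold createSortedArray
  cases hmax : PySem.List.max? xs (fun x => x) with
  | none => exact absurd ((PySem.List.max?_eq_none_iff xs _).mp hmax) hne
  | some mx =>
    have hmx := PySem.List.max?_isMax hmax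
    simp only []
    have h0 : xs = ([] : List Int) ++ xs := rfl
    have hl := loop_eq xs [] (List.replicate (mx + 2).toNat 0) 0 (mx + 2) (10 ^ 9 + 7) xs h0
      (fun x hx => ⟨hpos x hx, by have := hmx x hx; omega⟩)
      (by simp)
      (by
        intro k hk
        rw [List.map_congr_left (g := fun _ => (0:Int)) ?_]
        · simp
        · intro j _
          simp only [List.getD_eq_getElem?_getD, List.getElem?_replicate]
          split_ifs <;> rfl)
    simp only [List.length_nil, Nat.cast_zero] at hl
    rw [hl]
    rfl
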